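-- pv_equiv track=rewrite | github.com/arwyn6969/CODEFINDER | app/services/grid_generator.py | _create_grid_cells
-- ===== SOURCE A (Python) =====
-- from typing import List, Dict, Any, Optional, Tuple, Iterator
--
-- def _create_grid_cells(text: str, rows: int, cols: int) -> List[List[str]]:
--     """
--     Create 2D grid from filtered text
--     """
--     cells = []
--
--     for row in range(rows):
--         row_cells = []
--         for col in range(cols):
--             index = row * cols + col
--             if index < len(text):
--                 row_cells.append(text[index])
--             else:
--                 row_cells.append('')  # Empty cell if text is shorter than grid
--         cells.append(row_cells)
--
--     return cells
-- ===== SOURCE B (Python) =====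
-- def _create_grid_cells(text, rows, cols):
--     """Create 2D grid from filtered text (slice-and-pad per row)."""
--     width = max(cols, 0)
--
--     def make_row(r):
--         chunk = list(text[r * width:(r + 1) * width])
--         return chunk + [''] * (width - len(chunk))
--
--     return [make_row(r) for r in range(rows)]
-- ===== Notes on version B (the rewrite author's own statement) =====
-- stated objective: simpler
-- what changed: Replaced the per-cell flat-index computation with its bounds check inside nested row/col loops by a per-row slice-and-pad: each row is list(text[r*width:(r+1)*width]) padded with '' to width (width = max(cols, 0)).
import Mathlib
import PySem

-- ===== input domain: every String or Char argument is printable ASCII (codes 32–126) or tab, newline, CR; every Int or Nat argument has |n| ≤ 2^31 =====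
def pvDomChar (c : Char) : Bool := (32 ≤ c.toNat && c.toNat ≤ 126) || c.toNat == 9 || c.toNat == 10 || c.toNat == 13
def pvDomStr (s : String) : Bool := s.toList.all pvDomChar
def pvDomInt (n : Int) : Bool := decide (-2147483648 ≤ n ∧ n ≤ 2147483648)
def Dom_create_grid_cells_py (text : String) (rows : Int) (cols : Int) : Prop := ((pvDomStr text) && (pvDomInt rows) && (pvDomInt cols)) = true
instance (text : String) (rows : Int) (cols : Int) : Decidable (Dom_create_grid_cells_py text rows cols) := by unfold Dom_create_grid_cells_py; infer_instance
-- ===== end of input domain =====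

-- B replaces A's per-cell flat-index-and-bounds-test loop by a per-row slice-and-pad step (objective: simpler).

-- ===== PORT A =====
-- literal port of A: nested loops over range(rows) × range(cols), appending
-- text[index] (always in range under the branch's guard, so pyGetD is exact there) or '' per cell
def create_grid_cells_py (text : String) (rows : Int) (cols : Int) : List (List String) :=
  let cs := text.toList
  (PySem.List.pyRange 0 rows 1).foldl
    (fun cells row =>
      cells ++ [(PySem.List.pyRange 0 cols 1).foldl
        (fun row_cells col =>
          if row * cols + col < (cs.length : Int) then
            row_cells ++ [String.ofList [PySem.List.pyGetD cs (row * cols + col) ' ']]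
          else
            row_cells ++ [""])
        []])
    []

-- ===== PORT B =====
-- port of B: width = max(cols, 0); each row is list(text[r*width:(r+1)*width]) padded with '' to width
def create_grid_cells_py_alt (text : String) (rows : Int) (cols : Int) : List (List String) :=
  let cs := text.toList
  let width := max cols 0
  (PySem.List.pyRange 0 rows 1).map
    (fun r =>
      let chunk := (PySem.List.slice cs (some (r * width)) (some ((r + 1) * width))).map
        (fun c => String.ofList [c])
      chunk ++ List.replicate (width - (chunk.length : Int)).toNat "")

-- ===== PRECONDITION & SPEC =====
def Spec_create_grid_cells_py (text : String) (rows : Int) (cols : Int) (out : List (List String)) : Prop := out = create_grid_cells_py_alt text rows cols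
instance (text : String) (rows : Int) (cols : Int) (out : List (List String)) : Decidable (Spec_create_grid_cells_py text rows cols out) := by unfold Spec_create_grid_cells_py; infer_instance

-- ===== CLAIM (what is proved, stated in full; the proofs are below) =====
def Claim_equal_create_grid_cells_py : Prop := ∀ (text : String) (rows : Int) (cols : Int), Dom_create_grid_cells_py text rows cols → Spec_create_grid_cells_py text rows cols (create_grid_cells_py text rows cols)

-- ===== LEMMAS AND PROOFS =====

-- one row, on the Nat side: the per-cell guarded map equals the chunk plus padding
theorem pv_row_core (cs : List Char) (s m : Nat) :
    (List.range m).map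
        (fun j => if s + j < cs.length then String.ofList [cs.getD (s + j) ' '] else "")
      = ((cs.drop s).take m).map (fun c => String.ofList [c])
        ++ List.replicate (m - ((cs.drop s).take m).length) "" := by
  induction m with
  | zero => simp
  | succ m ih =>
    rw [List.range_succ, List.map_append, ih]
    by_cases h : s + m < cs.length
    · have hm : m < (cs.drop s).length := by
        simp only [List.length_drop]; omega
      have htake : (cs.drop s).take (m + 1) = (cs.drop s).take m ++ [(cs.drop s)[m]] := by
        rw [List.take_add_one, List.getElem?_eq_getElem hm]; rfl
      have hlen : ((cs.drop s).take m).length = m := by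
        simp only [List.length_take, List.length_drop]; omega
      have hget : (cs.drop s)[m] = cs.getD (s + m) ' ' := by
        rw [List.getElem_drop, List.getD_eq_getElem _ _ (by omega)]
      rw [htake]
      simp [h, hlen, hget]
    · have hlen1 : (cs.drop s).length ≤ m := by
        simp only [List.length_drop]; omega
      have htk : (cs.drop s).take (m + 1) = (cs.drop s).take m := by
        rw [List.take_of_length_le (by omega), List.take_of_length_le hlen1]
      have hlenle : ((cs.drop s).take m).length ≤ m := by
        simp only [List.length_take]; omega
      rw [htk,
        show m + 1 - ((cs.drop s).take m).length
            = (m - ((cs.drop s).take m).length) + 1 from by omega,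
        List.replicate_succ']
      simp [h]

-- one row, Int side: A's inner fold equals B's row for any row ≥ 0
theorem pv_row_eq (cs : List Char) (cols row : Int) (hrow : 0 ≤ row) :
    (PySem.List.pyRange 0 cols 1).foldl
        (fun row_cells col =>
          if row * cols + col < (cs.length : Int) then
            row_cells ++ [String.ofList [PySem.List.pyGetD cs (row * cols + col) ' ']]
          else
            row_cells ++ [""])
        []
      = (PySem.List.slice cs (some (row * max cols 0)) (some ((row + 1) * max cols 0))).map
            (fun c => String.ofList [c])
        ++ List.replicate
            ((max cols 0 : Int)
              - (((PySem.List.slice cs (some (row * max cols 0)) (some ((row + 1) * max cols 0))).map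
                  (fun c => String.ofList [c])).length : Int)).toNat "" := by
  rw [show (fun (row_cells : List String) (col : Int) =>
        if row * cols + col < (cs.length : Int) then
          row_cells ++ [String.ofList [PySem.List.pyGetD cs (row * cols + col) ' ']]
        else
          row_cells ++ [""])
      = (fun (row_cells : List String) (col : Int) =>
          row_cells ++ [if row * cols + col < (cs.length : Int) then
            String.ofList [PySem.List.pyGetD cs (row * cols + col) ' '] else ""])
      from by funext rc col; split <;> rfl]
  rw [PySem.List.foldl_append_singleton_eq_map, List.nil_append]
  by_cases hc : cols ≤ 0
  · have hmax : max cols 0 = 0 := by omega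
    have hrange : PySem.List.pyRange 0 cols 1 = [] := by
      simp [PySem.List.pyRange]; omega
    rw [hmax, hrange, mul_zero, mul_zero]
    rw [PySem.List.slice_toNat cs le_rfl le_rfl]
    simp
  · replace hc : 0 < cols := by omega
    have hmax : max cols 0 = cols := by omega
    rw [hmax]
    have hs : 0 ≤ row * cols := by positivity
    have hs2 : 0 ≤ (row + 1) * cols := by positivity
    set s : Nat := (row * cols).toNat with hsdef
    have hstop : ((row + 1) * cols).toNat - (row * cols).toNat = cols.toNat := by
      have : (row + 1) * cols = row * cols + cols := by ring
      omega
    rw [PySem.List.slice_toNat cs hs hs2, hstop, ← hsdef]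
    rw [show PySem.List.pyRange 0 cols 1 = PySem.List.pyRange 0 ((cols.toNat : Nat) : Int) 1
        from by norm_num [Int.toNat_of_nonneg hc.le]]
    rw [PySem.List.pyRange_zero_natCast, List.map_map]
    have hcell : ∀ j ∈ List.range cols.toNat,
        (if row * cols + (j : Int) < (cs.length : Int) then
            String.ofList [PySem.List.pyGetD cs (row * cols + (j : Int)) ' ']
          else "")
          = (if s + j < cs.length then String.ofList [cs.getD (s + j) ' '] else "") := by
      intro j _
      have hidx : row * cols + (j : Int) = ((s + j : Nat) : Int) := by omega
      rw [hidx, PySem.List.pyGetD_natCast]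
      by_cases hlt : s + j < cs.length
      · rw [if_pos (by exact_mod_cast hlt), if_pos hlt]
      · rw [if_neg (by exact_mod_cast hlt), if_neg hlt]
    trans (List.map
        (fun j => if s + j < cs.length then String.ofList [cs.getD (s + j) ' '] else "")
        (List.range cols.toNat))
    · exact List.map_congr_left hcell
    · rw [pv_row_core cs s cols.toNat]
      congr 1
      simp only [List.length_map, List.length_take, List.length_drop]
      congr 1
      omega

-- ===== VERDICT (by name: the statement is the Claim_ definition above) =====
theorem create_grid_cells_py_spec : Claim_equal_create_grid_cells_py := by
  intro text rows cols _
  simp only [Spec_create_grid_cells_py, create_grid_cells_py, create_grid_cells_py_alt]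
  rw [PySem.List.foldl_append_singleton_eq_map
    (f := fun row =>
      (PySem.List.pyRange 0 cols 1).foldl
        (fun row_cells col =>
          if row * cols + col < ((text.toList).length : Int) then
            row_cells ++ [String.ofList [PySem.List.pyGetD text.toList (row * cols + col) ' ']]
          else
            row_cells ++ [""])
        [])]
  rw [List.nil_append]
  apply List.map_congr_left
  intro row hrow
  have h0 : 0 ≤ row := (PySem.List.mem_pyRange_one.mp hrow).1
  exact pv_row_eq text.toList cols row h0
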